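-- pv_equiv track=rewrite | github.com/airnub/airnub-prefect-starter | airnub_prefect_starter/core/artifact_creators.py | _clean_for_artifact_key
-- ===== SOURCE A (Python) =====
-- def _clean_for_artifact_key(name_part: str, default_name: str = "item") -> str:
--     """
--     Cleans a string part to be valid for a Prefect artifact key.
--     Lowercase, numbers, and dashes only.
--     """
--     if not name_part:
--         name_part = default_name
--     cleaned = name_part.lower().replace(' ', '-').replace('_', '-')
--     cleaned = ''.join(c for c in cleaned if c.isalnum() or c == '-')
--     while '--' in cleaned: # Collapse multiple dashes
--         cleaned = cleaned.replace('--', '-')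
--     cleaned = cleaned.strip('-')
--     return cleaned if cleaned else default_name
-- ===== SOURCE B (Python) =====
-- def _clean_for_artifact_key(name_part: str, default_name: str = "item") -> str:
--     """Single-pass cleaner: emits alnum chars, inserting one dash between
--     groups that were separated by any run of space/underscore/dash."""
--     if not name_part:
--         name_part = default_name
--     pieces = []
--     pending_dash = False
--     for c in name_part.lower():
--         if c == ' ' or c == '_':
--             c = '-'
--         if c.isalnum():
--             if pending_dash and pieces:
--                 pieces.append('-')
--             pieces.append(c)
--             pending_dash = False
--         elif c == '-':
--             pending_dash = True
--     cleaned = ''.join(pieces)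
--     return cleaned if cleaned else default_name
-- ===== Notes on version B (the rewrite author's own statement) =====
-- stated objective: simpler
-- what changed: A filters the characters and then repeatedly runs whole-string dash-collapsing replace passes until a fixpoint, followed by a final strip of edge dashes; B makes a single pass over the characters with a pending-dash flag that filters, collapses dash runs and strips leading/trailing dashes at once.
import Mathlib
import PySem

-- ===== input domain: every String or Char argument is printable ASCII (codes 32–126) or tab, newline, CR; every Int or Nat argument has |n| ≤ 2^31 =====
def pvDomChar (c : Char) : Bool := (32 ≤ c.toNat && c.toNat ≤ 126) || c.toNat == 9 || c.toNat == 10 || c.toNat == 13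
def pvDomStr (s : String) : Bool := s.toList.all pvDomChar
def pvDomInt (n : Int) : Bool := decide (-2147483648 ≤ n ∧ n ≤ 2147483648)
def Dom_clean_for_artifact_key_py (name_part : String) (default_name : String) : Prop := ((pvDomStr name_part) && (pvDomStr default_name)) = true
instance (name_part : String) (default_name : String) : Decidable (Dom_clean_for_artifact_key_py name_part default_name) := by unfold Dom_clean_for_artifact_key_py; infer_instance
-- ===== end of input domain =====

-- B replaces A's repeated global '--'→'-' replace passes and final strip('-') with one
-- pass over the characters keeping a pending-dash flag (objective: simpler, single pass).

-- ===== PORT A =====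
-- `repl2` and the lemmas up to `repl2_length_lt` exist only to justify termination of the
-- `while '--' in cleaned` loop: one `replace('--','-')` pass strictly shortens the string.
def repl2 : List Char → List Char
  | [] => []
  | [c] => [c]
  | c :: d :: t => if c = '-' ∧ d = '-' then '-' :: repl2 t else c :: repl2 (d :: t)
termination_by l => l.length
decreasing_by all_goals simp

theorem go_dd : ∀ (fuel : Nat) (l acc : List Char), l.length ≤ fuel →
    PySem.Chars.replace.go ['-','-'] ['-'] fuel l acc = acc.reverse ++ repl2 l := by
  intro fuel
  induction fuel with
  | zero =>
    intro l acc h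
    have : l = [] := List.eq_nil_of_length_eq_zero (Nat.le_zero.mp h)
    subst this; simp [PySem.Chars.replace.go, repl2]
  | succ n ih =>
    intro l acc h
    match l with
    | [] => simp [PySem.Chars.replace.go, repl2]
    | [c] =>
      simp only [PySem.Chars.replace.go, List.isPrefixOf, Bool.and_false, repl2]
      rw [ih [] (c :: acc) (by simp)]
      simp [repl2]
    | c :: d :: t =>
      simp only [PySem.Chars.replace.go, List.isPrefixOf, repl2, Bool.and_true]
      by_cases hcd : c = '-' ∧ d = '-'
      · obtain ⟨hc, hd⟩ := hcd
        subst hc; subst hd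
        simp only [BEq.rfl, Bool.and_self, if_true, List.length_cons, List.length_nil,
          List.drop_succ_cons, List.drop_zero]
        simp only [List.length_cons] at h
        rw [ih t (['-'].reverse ++ acc) (by omega)]
        simp
      · have hb : ('-' == c && '-' == d) = false := by
          rcases not_and_or.mp hcd with hc | hd
          · simp [Ne.symm hc]
          · simp [Ne.symm hd]
        rw [hb]
        simp only [Bool.false_eq_true, if_false, if_neg hcd]
        simp only [List.length_cons] at h
        rw [ih (d :: t) (c :: acc) (by simp only [List.length_cons]; omega)]
        simp

theorem replace_dd (l : List Char) :
    PySem.Chars.replace l ['-','-'] ['-'] = repl2 l := by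
  simp [PySem.Chars.replace]
  rw [go_dd l.length l [] le_rfl]
  simp

theorem repl2_length_le (l : List Char) : (repl2 l).length ≤ l.length := by
  induction l using repl2.induct with
  | case1 => simp [repl2]
  | case2 c => simp [repl2]
  | case3 c d t hcd ih => simp only [repl2, if_pos hcd]; simp at ih ⊢; omega
  | case4 c d t hcd ih => simp only [repl2, if_neg hcd]; simp at ih ⊢; omega

theorem repl2_length_lt (l : List Char) (h : ['-','-'] <:+: l) :
    (repl2 l).length < l.length := by
  induction l using repl2.induct with
  | case1 => simp at h
  | case2 c =>
    exfalso
    have := h.length_le; simp at this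
  | case3 c d t hcd ih =>
    have := repl2_length_le t
    simp only [repl2, if_pos hcd, List.length_cons]; omega
  | case4 c d t hcd ih =>
    have ht : ['-','-'] <:+: (d :: t) := by
      rcases List.infix_cons_iff.mp h with hp | hi
      · exfalso
        rcases List.cons_prefix_cons.mp hp with ⟨hc, hp2⟩
        rcases List.cons_prefix_cons.mp hp2 with ⟨hd, _⟩
        exact hcd ⟨hc.symm, hd.symm⟩
      · exact hi
    simp only [repl2, if_neg hcd]
    have := ih ht
    simp only [List.length_cons] at this ⊢
    omega

def pyCollapse (l : List Char) : List Char :=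
  if h : PySem.Chars.isIn ['-','-'] l = true then
    pyCollapse (PySem.Chars.replace l ['-','-'] ['-'])
  else l
termination_by l.length
decreasing_by
  rw [replace_dd]
  exact repl2_length_lt l ((PySem.Chars.isIn_iff_infix _ _).mp h)

def clean_for_artifact_key_py (name_part : String) (default_name : String) : String :=
  -- if not name_part: name_part = default_name
  let np : List Char := if name_part.toList = [] then default_name.toList else name_part.toList
  -- cleaned = name_part.lower().replace(' ', '-').replace('_', '-')
  let cleaned := PySem.Chars.replace (PySem.Chars.replace (PySem.Chars.lower np) [' '] ['-']) ['_'] ['-']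
  -- cleaned = ''.join(c for c in cleaned if c.isalnum() or c == '-')
  let cleaned := cleaned.filter (fun c => PySem.Chars.isalnum c || c == '-')
  -- while '--' in cleaned: cleaned = cleaned.replace('--', '-')
  let cleaned := pyCollapse cleaned
  -- cleaned = cleaned.strip('-')
  let cleaned := PySem.Chars.stripChars cleaned ['-']
  -- return cleaned if cleaned else default_name
  if cleaned = [] then default_name else String.mk cleaned

-- ===== PORT B =====
-- the for-loop of Source B: state = (pieces, pending_dash)
def altLoop : List Char → List Char → Bool → List Char
  | [], pieces, _ => pieces
  | c :: t, pieces, pending =>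
    let c' := if c = ' ' ∨ c = '_' then '-' else c
    if PySem.Chars.isalnum c' then
      altLoop t (pieces ++ (if pending ∧ pieces ≠ [] then ['-'] else []) ++ [c']) false
    else if c' = '-' then
      altLoop t pieces true
    else
      altLoop t pieces pending

def clean_for_artifact_key_py_alt (name_part : String) (default_name : String) : String :=
  let np : List Char := if name_part.toList = [] then default_name.toList else name_part.toList
  let cleaned := altLoop (PySem.Chars.lower np) [] false
  if cleaned = [] then default_name else String.mk cleaned

-- ===== PRECONDITION & SPEC =====
def Spec_clean_for_artifact_key_py (name_part : String) (default_name : String) (out : String) : Prop := out = clean_for_artifact_key_py_alt name_part default_name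
instance (name_part : String) (default_name : String) (out : String) : Decidable (Spec_clean_for_artifact_key_py name_part default_name out) := by unfold Spec_clean_for_artifact_key_py; infer_instance

-- ===== CLAIM (what is proved, stated in full; the proofs are below) =====
def Claim_equal_clean_for_artifact_key_py : Prop := ∀ (name_part : String) (default_name : String), Dom_clean_for_artifact_key_py name_part default_name → Spec_clean_for_artifact_key_py name_part default_name (clean_for_artifact_key_py name_part default_name)

-- ===== LEMMAS AND PROOFS =====

-- single-character replace is a map
theorem go_single (a b : Char) : ∀ (fuel : Nat) (l acc : List Char), l.length ≤ fuel →
    PySem.Chars.replace.go [a] [b] fuel l acc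
      = acc.reverse ++ l.map (fun c => if c = a then b else c) := by
  intro fuel
  induction fuel with
  | zero =>
    intro l acc h
    have : l = [] := List.eq_nil_of_length_eq_zero (Nat.le_zero.mp h)
    subst this; simp [PySem.Chars.replace.go]
  | succ n ih =>
    intro l acc h
    match l with
    | [] => simp [PySem.Chars.replace.go]
    | c :: t =>
      simp only [PySem.Chars.replace.go, List.isPrefixOf, Bool.and_true]
      simp only [List.length_cons] at h
      by_cases hc : c = a
      · subst hc
        simp only [BEq.rfl, if_true, List.length_cons, List.length_nil,
          List.drop_succ_cons, List.drop_zero]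
        rw [ih t ([b].reverse ++ acc) (by omega)]
        simp
      · have : (a == c) = false := by simp [Ne.symm hc]
        rw [this]
        simp only [Bool.false_eq_true, if_false]
        rw [ih t (c :: acc) (by omega)]
        simp [if_neg hc]

theorem replace_single (a b : Char) (l : List Char) :
    PySem.Chars.replace l [a] [b] = l.map (fun c => if c = a then b else c) := by
  simp [PySem.Chars.replace]
  rw [go_single a b l.length l [] le_rfl]
  simp

-- abbreviations for the proof
def subC (c : Char) : Char := if c = ' ' ∨ c = '_' then '-' else c
def keepC (c : Char) : Bool := PySem.Chars.isalnum c || c == '-'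
def dashB (c : Char) : Bool := c == '-'
def rstripD (l : List Char) : List Char := (l.reverse.dropWhile dashB).reverse

-- dash-run collapse as a direct recursion (the fixpoint of repl2)
def dedup : List Char → List Char
  | [] => []
  | [c] => [c]
  | c :: d :: t => if c = '-' ∧ d = '-' then dedup (d :: t) else c :: dedup (d :: t)
termination_by l => l.length
decreasing_by all_goals simp

-- the single-pass tail: what Source B's loop emits after the first kept alnum char
def tailG : List Char → Bool → List Char
  | [], _ => []
  | c :: t, p => if c = '-' then tailG t true else (if p then ['-'] else []) ++ c :: tailG t false

theorem dedup_head? (l : List Char) : (dedup l).head? = l.head? := by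
  induction l using dedup.induct with
  | case1 => simp [dedup]
  | case2 c => simp [dedup]
  | case3 c d t hcd ih =>
    obtain ⟨hc, hd⟩ := hcd
    subst hc; subst hd
    have he : dedup ('-' :: '-' :: t) = dedup ('-' :: t) := by simp [dedup]
    rw [he, ih]
    simp
  | case4 c d t hcd ih => simp [dedup, if_neg hcd]

theorem repl2_head? (l : List Char) : (repl2 l).head? = l.head? := by
  induction l using repl2.induct with
  | case1 => simp [repl2]
  | case2 c => simp [repl2]
  | case3 c d t hcd ih =>
    obtain ⟨hc, hd⟩ := hcd
    subst hc; subst hd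
    simp [repl2]
  | case4 c d t hcd ih => simp [repl2, if_neg hcd]

theorem dedup_cons_dash (u : List Char) :
    dedup ('-' :: u) = if u.head? = some '-' then dedup u else '-' :: dedup u := by
  match u with
  | [] => simp [dedup]
  | d :: t =>
    by_cases hd : d = '-'
    · subst hd; simp [dedup]
    · simp [dedup, hd, Ne.symm]

theorem dedup_cons_nondash (c : Char) (u : List Char) (hc : c ≠ '-') :
    dedup (c :: u) = c :: dedup u := by
  match u with
  | [] => simp [dedup]
  | d :: t =>
    have hcd : ¬(c = '-' ∧ d = '-') := fun h => hc h.1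
    simp [dedup, hcd]

theorem dedup_repl2 (l : List Char) : dedup (repl2 l) = dedup l := by
  induction l using repl2.induct with
  | case1 => simp [repl2]
  | case2 c => simp [repl2]
  | case3 c d t hcd ih =>
    obtain ⟨hc, hd⟩ := hcd
    subst hc; subst hd
    have h1 : repl2 ('-' :: '-' :: t) = '-' :: repl2 t := by simp [repl2]
    have h2 : dedup ('-' :: '-' :: t) = dedup ('-' :: t) := by simp [dedup]
    rw [h1, h2, dedup_cons_dash (repl2 t), dedup_cons_dash t, repl2_head?, ih]
  | case4 c d t hcd ih =>
    have h1 : repl2 (c :: d :: t) = c :: repl2 (d :: t) := by simp [repl2, if_neg hcd]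
    rw [h1]
    by_cases hc : c = '-'
    · subst hc
      have hd : d ≠ '-' := fun h => hcd ⟨rfl, h⟩
      rw [dedup_cons_dash (repl2 (d :: t)), dedup_cons_dash (d :: t)]
      rw [repl2_head?, ih]
    · rw [dedup_cons_nondash c _ hc, dedup_cons_nondash c _ hc, ih]

theorem dedup_noInfix (l : List Char) : ¬ (['-','-'] <:+: dedup l) := by
  induction l using dedup.induct with
  | case1 => simp [dedup]
  | case2 c =>
    intro h
    have := h.length_le; simp [dedup] at this
  | case3 c d t hcd ih =>
    obtain ⟨hc, hd⟩ := hcd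
    subst hc; subst hd
    have he : dedup ('-' :: '-' :: t) = dedup ('-' :: t) := by simp [dedup]
    rw [he]; exact ih
  | case4 c d t hcd ih =>
    rw [show dedup (c :: d :: t) = c :: dedup (d :: t) by simp [dedup, if_neg hcd]]
    intro h
    rcases List.infix_cons_iff.mp h with hp | hi
    · rcases List.cons_prefix_cons.mp hp with ⟨hc1, hp2⟩
      rcases hp2 with ⟨r, hr⟩
      have : (dedup (d :: t)).head? = some '-' := by rw [← hr]; simp
      rw [dedup_head?] at this
      simp at this
      exact hcd ⟨hc1.symm, this⟩
    · exact ih hi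

theorem dedup_eq_self (l : List Char) (h : ¬ (['-','-'] <:+: l)) : dedup l = l := by
  induction l using dedup.induct with
  | case1 => simp [dedup]
  | case2 c => simp [dedup]
  | case3 c d t hcd ih =>
    exfalso
    obtain ⟨hc, hd⟩ := hcd
    exact h (by subst hc; subst hd; exact ⟨[], t, by simp⟩)
  | case4 c d t hcd ih =>
    rw [show dedup (c :: d :: t) = c :: dedup (d :: t) by simp [dedup, if_neg hcd]]
    rw [ih (fun hi => h (List.infix_cons hi))]

theorem pyCollapse_eq_dedup (l : List Char) : pyCollapse l = dedup l := by
  induction l using pyCollapse.induct with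
  | case1 l h ih =>
    rw [pyCollapse, dif_pos h, ih, replace_dd, dedup_repl2]
  | case2 l h =>
    rw [pyCollapse, dif_neg h]
    rw [dedup_eq_self]
    intro hi
    exact h ((PySem.Chars.isIn_iff_infix _ _).mpr hi)

theorem dropWhile_dash_of_head (l : List Char) (h : l.head? ≠ some '-') :
    l.dropWhile dashB = l := by
  match l with
  | [] => simp
  | c :: t =>
    simp at h
    simp [List.dropWhile_cons, dashB, h]

theorem dedup_dropWhile (l : List Char) :
    dedup (l.dropWhile dashB) = (dedup l).dropWhile dashB := by
  induction l using dedup.induct with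
  | case1 => simp [dedup]
  | case2 c =>
    by_cases hc : c = '-'
    · subst hc; simp [dedup, dashB]
    · simp [dedup, List.dropWhile_cons, dashB, hc]
  | case3 c d t hcd ih =>
    obtain ⟨hc, hd⟩ := hcd
    subst hc; subst hd
    rw [show dedup ('-' :: '-' :: t) = dedup ('-' :: t) by simp [dedup]]
    rw [← ih]
    simp [List.dropWhile_cons, dashB]
  | case4 c d t hcd ih =>
    by_cases hc : c = '-'
    · subst hc
      have hd : d ≠ '-' := fun h => hcd ⟨rfl, h⟩
      rw [show dedup ('-' :: d :: t) = '-' :: dedup (d :: t) by simp [dedup, hd]]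
      rw [show List.dropWhile dashB ('-' :: d :: t) = List.dropWhile dashB (d :: t) by
        simp [List.dropWhile_cons, dashB]]
      rw [show List.dropWhile dashB ('-' :: dedup (d :: t)) = List.dropWhile dashB (dedup (d :: t)) by
        simp [List.dropWhile_cons, dashB]]
      rw [ih]
    · rw [show dedup (c :: d :: t) = c :: dedup (d :: t) by simp [dedup, if_neg hcd]]
      have hcb : dashB c = false := by simp [dashB, hc]
      rw [show List.dropWhile dashB (c :: d :: t) = c :: d :: t by simp [List.dropWhile_cons, hcb]]
      rw [show List.dropWhile dashB (c :: dedup (d :: t)) = c :: dedup (d :: t) by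
        simp [List.dropWhile_cons, hcb]]
      rw [show dedup (c :: d :: t) = c :: dedup (d :: t) by simp [dedup, if_neg hcd]]

theorem rstripD_cons_nondash (c : Char) (l : List Char) (hc : c ≠ '-') :
    rstripD (c :: l) = c :: rstripD l := by
  simp only [rstripD, List.reverse_cons, List.dropWhile_append]
  by_cases he : (l.reverse.dropWhile dashB).isEmpty
  · simp [he, List.dropWhile_cons, dashB, hc, List.isEmpty_iff.mp he]
  · simp [he]

theorem rstripD_cons_dash (l : List Char) :
    rstripD ('-' :: l) = if rstripD l = [] then [] else '-' :: rstripD l := by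
  simp only [rstripD, List.reverse_cons, List.dropWhile_append]
  by_cases he : (l.reverse.dropWhile dashB).isEmpty
  · simp [he, List.dropWhile_cons, dashB, List.isEmpty_iff.mp he]
  · have h2 : (l.reverse.dropWhile dashB).reverse ≠ [] := by
      simp [List.isEmpty_iff] at he
      simp [he]
    simp [he, h2]

theorem dedup_head_dash (u : List Char) (h : u.head? = some '-') :
    ∃ w, dedup u = '-' :: w ∧ w.head? ≠ some '-' ∧ (dedup u).dropWhile dashB = w := by
  have hh : (dedup u).head? = some '-' := by rw [dedup_head?]; exact h
  have hni := dedup_noInfix u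
  cases hd : dedup u with
  | nil => rw [hd] at hh; simp at hh
  | cons a w =>
    rw [hd] at hh
    simp at hh
    subst hh
    have hwh : w.head? ≠ some '-' := by
      intro hw
      cases w with
      | nil => simp at hw
      | cons b w' =>
        simp at hw
        subst hw
        rw [hd] at hni
        exact hni ⟨[], w', by simp⟩
    refine ⟨w, rfl, hwh, ?_⟩
    rw [List.dropWhile_cons]
    have hdb : dashB '-' = true := by simp [dashB]
    rw [hdb]
    simp only [if_true]
    exact dropWhile_dash_of_head w hwh

theorem expr_eq (u : List Char) :
    (if rstripD ((dedup u).dropWhile dashB) = [] then []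
     else if u.head? = some '-' then '-' :: rstripD ((dedup u).dropWhile dashB)
     else rstripD ((dedup u).dropWhile dashB)) = rstripD (dedup u) := by
  by_cases hu : u.head? = some '-'
  · obtain ⟨w, hw, hwh, hdw⟩ := dedup_head_dash u hu
    rw [hdw, hw, rstripD_cons_dash w]
    by_cases hr : rstripD w = [] <;> simp [hu, hr]
  · rw [dropWhile_dash_of_head (dedup u) (by rw [dedup_head?]; exact hu)]
    by_cases hr : rstripD (dedup u) = [] <;> simp [hu, hr]

-- the main single-pass characterisation
theorem tailG_formula : ∀ (t : List Char) (p : Bool),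
    tailG t p =
      (if rstripD ((dedup t).dropWhile dashB) = [] then []
       else if p = true ∨ t.head? = some '-' then '-' :: rstripD ((dedup t).dropWhile dashB)
       else rstripD ((dedup t).dropWhile dashB)) := by
  intro t
  induction t with
  | nil => intro p; simp [tailG, dedup, rstripD]
  | cons c u ih =>
    intro p
    by_cases hc : c = '-'
    · subst hc
      rw [show tailG ('-' :: u) p = tailG u true by simp [tailG]]
      rw [ih true]
      have hdw : (dedup ('-' :: u)).dropWhile dashB = (dedup u).dropWhile dashB := by
        rw [dedup_cons_dash u]
        by_cases hu : u.head? = some '-'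
        · simp [hu]
        · simp only [hu, if_false]
          rw [List.dropWhile_cons]
          have hdb : dashB '-' = true := by simp [dashB]
          rw [hdb]
          simp
      rw [hdw]
      simp
    · rw [show tailG (c :: u) p = (if p then ['-'] else []) ++ c :: tailG u false by
        simp [tailG, hc]]
      rw [ih false]
      simp only [Bool.false_eq_true, false_or]
      rw [expr_eq u]
      have hdd : dedup (c :: u) = c :: dedup u := dedup_cons_nondash c u hc
      have hdw : (dedup (c :: u)).dropWhile dashB = c :: dedup u := by
        rw [hdd, List.dropWhile_cons]
        have hcb : dashB c = false := by simp [dashB, hc]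
        simp [hcb]
      rw [hdw, rstripD_cons_nondash c (dedup u) hc]
      have hne : c :: rstripD (dedup u) ≠ [] := by simp
      simp only [hne, if_false]
      by_cases hp : p
      · subst hp; simp
      · simp [hp, hc]

theorem tailG_false (t : List Char) : tailG t false = rstripD (dedup t) := by
  rw [tailG_formula t false]
  simp only [Bool.false_eq_true, false_or]
  rw [expr_eq t]

-- reduce Source B's loop to the filtered list of substituted characters
def gLoop : List Char → List Char → Bool → List Char
  | [], acc, _ => acc
  | c :: t, acc, p =>
    if PySem.Chars.isalnum c then
      gLoop t (acc ++ (if p ∧ acc ≠ [] then ['-'] else []) ++ [c]) false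
    else if c = '-' then gLoop t acc true
    else gLoop t acc p

theorem altLoop_eq_gLoop (l : List Char) : ∀ (acc : List Char) (p : Bool),
    altLoop l acc p = gLoop (l.map subC) acc p := by
  induction l with
  | nil => intro acc p; simp [altLoop, gLoop]
  | cons c t ih =>
    intro acc p
    simp only [altLoop, List.map_cons, gLoop, subC]
    by_cases h1 : PySem.Chars.isalnum (if c = ' ' ∨ c = '_' then '-' else c)
    · simp only [h1, if_true, ih]
    · simp only [h1, if_false, Bool.false_eq_true]
      by_cases h2 : (if c = ' ' ∨ c = '_' then '-' else c) = '-'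
      · simp only [h2, if_true, ih]
      · simp only [h2, if_false, ih]

theorem gLoop_filter (l : List Char) : ∀ (acc : List Char) (p : Bool),
    gLoop l acc p = gLoop (l.filter keepC) acc p := by
  induction l with
  | nil => intro acc p; simp
  | cons c t ih =>
    intro acc p
    by_cases ha : PySem.Chars.isalnum c
    · have hk : keepC c = true := by simp [keepC, ha]
      simp only [gLoop, if_pos ha, List.filter_cons, hk, if_true]
      rw [ih]
    · by_cases hd : c = '-'
      · have hk : keepC c = true := by simp [keepC, hd]
        simp only [gLoop, if_neg ha, if_pos hd, List.filter_cons, hk, if_true]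
        rw [ih]
      · have hk : keepC c = false := by simp [keepC, ha, hd]
        simp only [gLoop, if_neg ha, if_neg hd, List.filter_cons, hk]
        simp only [Bool.false_eq_true, if_false]
        exact ih acc p

theorem gLoop_acc (t : List Char) : ∀ (acc : List Char) (p : Bool),
    (∀ c ∈ t, keepC c) → acc ≠ [] → gLoop t acc p = acc ++ tailG t p := by
  induction t with
  | nil => intro acc p _ _; simp [gLoop, tailG]
  | cons c t ih =>
    intro acc p hk hacc
    have hkc := hk c (by simp)
    have hkt : ∀ x ∈ t, keepC x := fun x hx => hk x (by simp [hx])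
    by_cases hd : c = '-'
    · subst hd
      have ha : ¬ PySem.Chars.isalnum '-' = true := by decide
      simp only [gLoop, if_neg ha, if_pos rfl, tailG, if_pos rfl]
      exact ih acc true hkt hacc
    · have ha : PySem.Chars.isalnum c = true := by
        simp [keepC, hd] at hkc
        exact hkc
      simp only [gLoop, if_pos ha, tailG, if_neg hd]
      rw [ih _ false hkt (by simp)]
      by_cases hp : p
      · subst hp; simp [hacc]
      · simp [hp]

theorem gLoop_entry (m : List Char) (hk : ∀ c ∈ m, keepC c) : ∀ (p : Bool),
    gLoop m [] p =
      (match m.dropWhile dashB with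
       | [] => []
       | c :: t => c :: tailG t false) := by
  induction m with
  | nil => intro p; simp [gLoop]
  | cons c u ih =>
    intro p
    have hku : ∀ x ∈ u, keepC x := fun x hx => hk x (by simp [hx])
    by_cases hd : c = '-'
    · subst hd
      have ha : ¬ PySem.Chars.isalnum '-' = true := by decide
      have hg : gLoop ('-' :: u) [] p = gLoop u [] true := by
        simp [gLoop, ha]
      rw [hg, ih hku true]
      have hdw : List.dropWhile dashB ('-' :: u) = List.dropWhile dashB u := by
        simp [List.dropWhile_cons, dashB]
      rw [hdw]
    · have ha : PySem.Chars.isalnum c = true := by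
        have := hk c (by simp)
        simp [keepC, hd] at this
        exact this
      have hg : gLoop (c :: u) [] p = gLoop u [c] false := by
        simp [gLoop, ha]
      rw [hg, gLoop_acc u [c] false hku (by simp)]
      have hdw : List.dropWhile dashB (c :: u) = c :: u := by
        simp [List.dropWhile_cons, dashB, hd]
      rw [hdw]
      rfl

-- glue: the composed single-char replaces are exactly subC
theorem sub_comp (c : Char) :
    (if (if c = ' ' then '-' else c) = '_' then '-' else (if c = ' ' then '-' else c)) = subC c := by
  by_cases h1 : c = ' '
  · subst h1; simp [subC]
  · by_cases h2 : c = '_'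
    · subst h2; simp [subC]
    · simp [subC, h1, h2]

theorem contains_dash (c : Char) : (['-'] : List Char).contains c = dashB c := by
  by_cases h : c = '-' <;> simp [dashB, h]

theorem dropWhile_head_false (p : Char → Bool) (c : Char) (t : List Char) :
    ∀ l : List Char, l.dropWhile p = c :: t → p c = false := by
  intro l
  induction l with
  | nil => intro h; simp at h
  | cons a u ih =>
    intro h
    rw [List.dropWhile_cons] at h
    by_cases ha : p a
    · simp only [ha, if_true] at h
      exact ih h
    · simp [ha] at h
      obtain ⟨h1, -⟩ := h
      subst h1
      simp [ha]

-- the per-input list-level equivalence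
theorem core_eq (L : List Char) :
    PySem.Chars.stripChars
      (pyCollapse
        ((PySem.Chars.replace (PySem.Chars.replace L [' '] ['-']) ['_'] ['-']).filter
          (fun c => PySem.Chars.isalnum c || c == '-'))) ['-']
      = altLoop L [] false := by
  rw [replace_single ' ' '-' L, replace_single '_' '-']
  rw [List.map_map]
  have hmap : ((fun c => if c = '_' then '-' else c) ∘ fun c => if c = ' ' then '-' else c)
      = subC := by
    funext c
    simpa using sub_comp c
  rw [hmap]
  have hkeep : (fun c => PySem.Chars.isalnum c || c == '-') = keepC := by
    funext c; simp [keepC]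
  rw [hkeep]
  set m := (L.map subC).filter keepC with hm
  have hk : ∀ c ∈ m, keepC c := by
    intro c hc
    exact List.of_mem_filter hc
  rw [altLoop_eq_gLoop, gLoop_filter, ← hm, gLoop_entry m hk false]
  rw [pyCollapse_eq_dedup]
  have hstrip : PySem.Chars.stripChars (dedup m) ['-']
      = rstripD ((dedup m).dropWhile dashB) := by
    have hfun : (fun c => (['-'] : List Char).contains c) = dashB := by
      funext c
      exact contains_dash c
    simp only [PySem.Chars.stripChars, rstripD]
    rw [hfun]
  rw [hstrip, ← dedup_dropWhile m]
  cases hm1 : m.dropWhile dashB with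
  | nil => simp [dedup, rstripD]
  | cons c t =>
    have hc : dashB c = false := dropWhile_head_false dashB c t m hm1
    have hcne : c ≠ '-' := by simpa [dashB] using hc
    show rstripD (dedup (c :: t)) = c :: tailG t false
    rw [dedup_cons_nondash c t hcne, rstripD_cons_nondash c (dedup t) hcne, tailG_false]

-- ===== VERDICT (by name: the statement is the Claim_ definition above) =====
theorem clean_for_artifact_key_py_spec : Claim_equal_clean_for_artifact_key_py := by
  intro name_part default_name _
  unfold Spec_clean_for_artifact_key_py
  simp only [clean_for_artifact_key_py, clean_for_artifact_key_py_alt]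
  rw [core_eq]
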